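-- pv_equiv track=rewrite | github.com/KondratievaOlesya/PartyBot | partybot/bot.py | to_pages
-- ===== SOURCE A (Python) =====
-- MAX_MESSAGE_LEN = 1000
--
-- def to_pages(messages):
--     """
--     Sort messages in pages
--
--     :param list messages: Messages to show
--     :return: Pages to show
--     :rtype: list
--     """
--     curr_len = 0
--     num_pages = 0
--     pages = []
--     for message in messages:
--         if (curr_len + len(message)) > MAX_MESSAGE_LEN or len(pages) == 0:
--             num_pages += 1
--             curr_len = len(message)
--             pages.append(message)
--         else:
--             pages[num_pages - 1] += message
--             curr_len += len(message)
--     return pages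
-- ===== SOURCE B (Python) =====
-- MAX_MESSAGE_LEN = 1000
--
-- def to_pages(messages):
--     pages = []
--     i = 0
--     n = len(messages)
--     while i < n:
--         j = i + 1
--         total = len(messages[i])
--         while j < n and total + len(messages[j]) <= MAX_MESSAGE_LEN:
--             total += len(messages[j])
--             j += 1
--         pages.append(''.join(messages[i:j]))
--         i = j
--     return pages
-- ===== Notes on version B (the rewrite author's own statement) =====
-- stated objective: alternative
-- what changed: B iterates page-by-page: an outer loop picks the start of each page and an inner scan extends it as far as the length budget allows, then one join of the slice produces the page; A instead loops once per message, mutating the last page string in place via a tracked page index.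
import Mathlib
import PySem

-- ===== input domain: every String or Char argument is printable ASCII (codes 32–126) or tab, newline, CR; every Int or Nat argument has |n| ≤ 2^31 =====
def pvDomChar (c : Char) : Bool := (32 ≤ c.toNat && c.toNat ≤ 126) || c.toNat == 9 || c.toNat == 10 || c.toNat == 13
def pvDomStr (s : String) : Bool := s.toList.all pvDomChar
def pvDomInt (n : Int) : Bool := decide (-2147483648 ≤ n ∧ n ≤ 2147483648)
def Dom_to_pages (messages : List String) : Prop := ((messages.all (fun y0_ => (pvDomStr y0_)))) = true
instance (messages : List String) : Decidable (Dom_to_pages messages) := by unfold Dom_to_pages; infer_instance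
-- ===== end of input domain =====

-- B builds the output page-by-page (outer loop per page, inner scan extending the page,
-- one join of the slice) instead of A's per-message loop mutating the last page string in
-- place (objective: alternative decomposition, same cost).

-- ===== PORT A =====
-- state: (curr_len, num_pages, pages)
def to_pages (messages : List String) : List String :=
  (messages.foldl
    (fun (st : Int × Int × List String) message =>
      let curr_len := st.1
      let num_pages := st.2.1
      let pages := st.2.2
      if curr_len + PySem.Str.len message > 1000 ∨ pages.length = 0 then
        (PySem.Str.len message, num_pages + 1, pages ++ [message])
      else
        (curr_len + PySem.Str.len message, num_pages,
          PySem.List.pySetD pages (num_pages - 1)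
            (PySem.List.pyGetD pages (num_pages - 1) "" ++ message)))
    (0, 0, [])).2.2

-- ===== PORT B =====
-- the inner while loop: how many further messages still fit in the current page
def pvExtend : Int → List String → Nat
  | _, [] => 0
  | total, m :: r =>
    if total + PySem.Str.len m ≤ 1000 then 1 + pvExtend (total + PySem.Str.len m) r else 0

-- the outer while loop: emit one page (join of the slice), continue at its end
def to_pages_alt : List String → List String
  | [] => []
  | m :: rest =>
    let k := pvExtend (PySem.Str.len m) rest
    PySem.Str.join "" (m :: rest.take k) :: to_pages_alt (rest.drop k)
termination_by messages => messages.length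
decreasing_by
  simp only [List.length_drop, List.length_cons]
  omega

-- ===== PRECONDITION & SPEC =====
def Spec_to_pages (messages : List String) (out : List String) : Prop := out = to_pages_alt messages
instance (messages : List String) (out : List String) : Decidable (Spec_to_pages messages out) := by unfold Spec_to_pages; infer_instance

-- ===== CLAIM (what is proved, stated in full; the proofs are below) =====
def Claim_equal_to_pages : Prop := ∀ (messages : List String), Dom_to_pages messages → Spec_to_pages messages (to_pages messages)

-- ===== LEMMAS AND PROOFS =====

theorem pv_intercalate_nil (l : List (List Char)) : List.intercalate [] l = l.flatten := by
  induction l with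
  | nil => simp [List.intercalate]
  | cons a t ih =>
    cases t with
    | nil => simp [List.intercalate]
    | cons b r => simpa [List.intercalate, List.intersperse] using ih

theorem pv_join_nil : PySem.Str.join "" [] = "" := by
  apply String.toList_inj.mp
  simp [PySem.Str.toList_join, PySem.Chars.join, pv_intercalate_nil]

theorem pv_join_cons (m : String) (xs : List String) :
    PySem.Str.join "" (m :: xs) = m ++ PySem.Str.join "" xs := by
  apply String.toList_inj.mp
  simp [PySem.Str.toList_join, PySem.Chars.join, pv_intercalate_nil, String.toList_append]

theorem pv_getD_last (pref : List String) (p : String) :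
    PySem.List.pyGetD (pref ++ [p]) ((pref.length : Int) + 1 - 1) "" = p := by
  have h : ((pref.length : Int) + 1 - 1) = ((pref.length : Nat) : Int) := by omega
  rw [h, PySem.List.pyGetD_natCast]
  simp

theorem pv_setD_last (pref : List String) (p v : String) :
    PySem.List.pySetD (pref ++ [p]) ((pref.length : Int) + 1 - 1) v = pref ++ [v] := by
  have h : ((pref.length : Int) + 1 - 1) = ((pref.length : Nat) : Int) := by omega
  rw [h, PySem.List.pySetD_natCast]
  induction pref with
  | nil => simp
  | cons a t ih => simp [ih]

-- A's loop, once a page is open, equals B's page decomposition with the open page finished first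
theorem pv_loop (msgs : List String) (cl : Int) (pref : List String) (p : String) :
    (msgs.foldl
      (fun (st : Int × Int × List String) message =>
        let curr_len := st.1
        let num_pages := st.2.1
        let pages := st.2.2
        if curr_len + PySem.Str.len message > 1000 ∨ pages.length = 0 then
          (PySem.Str.len message, num_pages + 1, pages ++ [message])
        else
          (curr_len + PySem.Str.len message, num_pages,
            PySem.List.pySetD pages (num_pages - 1)
              (PySem.List.pyGetD pages (num_pages - 1) "" ++ message)))
      (cl, (pref.length : Int) + 1, pref ++ [p])).2.2
    = pref ++ (p ++ PySem.Str.join "" (msgs.take (pvExtend cl msgs)))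
        :: to_pages_alt (msgs.drop (pvExtend cl msgs)) := by
  induction msgs generalizing cl pref p with
  | nil => simp [pvExtend, to_pages_alt, pv_join_nil]
  | cons m rest ih =>
    by_cases hb : cl + PySem.Str.len m > 1000
    · rw [List.foldl_cons, if_pos (Or.inl hb)]
      have hk : pvExtend cl (m :: rest) = 0 := by
        rw [pvExtend, if_neg (not_le.mpr hb)]
      have hst : pref ++ [p] ++ [m] = (pref ++ [p]) ++ [m] := rfl
      have hlen : ((pref.length : Int) + 1) + 1 = (((pref ++ [p]).length : Nat) : Int) + 1 := by
        simp
      rw [hlen]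
      rw [ih (PySem.Str.len m) (pref ++ [p]) m]
      simp only [hk, List.take_zero, List.drop_zero]
      rw [pv_join_nil]
      have halt : to_pages_alt (m :: rest)
          = PySem.Str.join "" (m :: rest.take (pvExtend (PySem.Str.len m) rest))
            :: to_pages_alt (rest.drop (pvExtend (PySem.Str.len m) rest)) := by
        rw [to_pages_alt]
      rw [halt, pv_join_cons]
      simp
    · have hle : cl + PySem.Str.len m ≤ 1000 := not_lt.mp hb
      rw [List.foldl_cons, if_neg (by push Not; exact ⟨hle, by simp⟩)]
      simp only [pv_getD_last, pv_setD_last]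
      rw [ih (cl + PySem.Str.len m) pref (p ++ m)]
      have hk : pvExtend cl (m :: rest) = 1 + pvExtend (cl + PySem.Str.len m) rest := by
        rw [pvExtend, if_pos hle]
      rw [hk]
      simp only [Nat.add_comm 1, List.take_succ_cons, List.drop_succ_cons, pv_join_cons,
        String.append_assoc]

-- ===== VERDICT (by name: the statement is the Claim_ definition above) =====
theorem to_pages_spec : Claim_equal_to_pages := by
  intro messages _
  unfold Spec_to_pages to_pages
  cases messages with
  | nil => simp [to_pages_alt]
  | cons m rest =>
    have h := pv_loop rest (PySem.Str.len m) [] m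
    simp only [List.length_nil, Nat.cast_zero, Int.zero_add, List.nil_append] at h
    rw [List.foldl_cons]
    show (List.foldl
        (fun (st : Int × Int × List String) message =>
          let curr_len := st.1
          let num_pages := st.2.1
          let pages := st.2.2
          if curr_len + PySem.Str.len message > 1000 ∨ pages.length = 0 then
            (PySem.Str.len message, num_pages + 1, pages ++ [message])
          else
            (curr_len + PySem.Str.len message, num_pages,
              PySem.List.pySetD pages (num_pages - 1)
                (PySem.List.pyGetD pages (num_pages - 1) "" ++ message)))
        (if (0 : Int) + PySem.Str.len m > 1000 ∨ ([] : List String).length = 0 then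
            (PySem.Str.len m, (0 : Int) + 1, ([] : List String) ++ [m])
          else
            ((0 : Int) + PySem.Str.len m, (0 : Int),
              PySem.List.pySetD ([] : List String) ((0 : Int) - 1)
                (PySem.List.pyGetD ([] : List String) ((0 : Int) - 1) "" ++ m)))
        rest).2.2 = to_pages_alt (m :: rest)
    rw [if_pos (Or.inr List.length_nil), List.nil_append, zero_add, h, to_pages_alt, pv_join_cons]
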